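-- pv_equiv track=rewrite | github.com/HCID274/MC_Servant | backend/db/experience_repository.py | _infer_tool_tier
-- ===== SOURCE A (Python) =====
-- from typing import List, Optional, Dict, Any, TYPE_CHECKING
--
-- def _infer_tool_tier(inventory: Dict[str, int]) -> Optional[str]:
--     """
--     从背包推断最高工具等级
--
--     Returns:
--         最高工具等级 (netherite > diamond > iron > stone > wooden) 或 None
--     """
--     tiers = ["netherite", "diamond", "iron", "stone", "wooden"]
--     tool_keywords = ["pickaxe", "axe", "shovel", "sword", "hoe"]
--
--     for tier in tiers:
--         for item in inventory.keys():
--             item_lower = item.lower()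
--             if tier in item_lower and any(tool in item_lower for tool in tool_keywords):
--                 return tier
--     return None
-- ===== SOURCE B (Python) =====
-- def _infer_tool_tier(inventory):
--     tiers = ["netherite", "diamond", "iron", "stone", "wooden"]
--     tool_keywords = ["pickaxe", "axe", "shovel", "sword", "hoe"]
--     best = None  # (tier index, tier) of the best tool seen so far
--     for item in inventory.keys():
--         item_lower = item.lower()
--         if any(tool in item_lower for tool in tool_keywords):
--             for i, tier in enumerate(tiers):
--                 if tier in item_lower:
--                     if best is None or i < best[0]:
--                         best = (i, tier)
--                     break
--     return None if best is None else best[1]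
-- ===== Notes on version B (the rewrite author's own statement) =====
-- stated objective: alternative
-- what changed: Replaces five prioritized rescans of the inventory (one per tier) by a single pass that keeps, per item containing a tool keyword, its first matching tier index and folds a running minimum.
import Mathlib
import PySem

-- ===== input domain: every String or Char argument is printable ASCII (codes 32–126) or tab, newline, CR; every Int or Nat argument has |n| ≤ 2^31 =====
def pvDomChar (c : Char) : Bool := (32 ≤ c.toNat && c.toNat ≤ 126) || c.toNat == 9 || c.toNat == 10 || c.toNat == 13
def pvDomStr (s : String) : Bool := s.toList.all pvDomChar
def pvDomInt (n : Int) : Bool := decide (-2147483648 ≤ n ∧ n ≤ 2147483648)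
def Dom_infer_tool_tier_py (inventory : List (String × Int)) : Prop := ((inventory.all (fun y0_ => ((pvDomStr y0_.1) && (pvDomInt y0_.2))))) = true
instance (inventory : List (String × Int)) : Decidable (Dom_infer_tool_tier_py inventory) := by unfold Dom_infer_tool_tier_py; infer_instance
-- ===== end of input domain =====

-- B replaces A's five prioritized rescans of the inventory by ONE pass that folds a running
-- minimal tier index over the items (objective: alternative decomposition, same result).

def pvTiers : List String := ["netherite", "diamond", "iron", "stone", "wooden"]
def pvTools : List String := ["pickaxe", "axe", "shovel", "sword", "hoe"]

-- ===== PORT A =====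
-- inner loop: 'for item in inventory.keys(): …'
def pvAInner (tier : String) : List (String × Int) → Bool
  | [] => false
  | (item, _) :: rest =>
      let item_lower := PySem.Str.lower item
      if PySem.Str.isIn tier item_lower && pvTools.any (fun tool => PySem.Str.isIn tool item_lower)
      then true else pvAInner tier rest

-- outer loop: 'for tier in tiers: …'
def pvAOuter (inventory : List (String × Int)) : List String → Option String
  | [] => none
  | tier :: rest => if pvAInner tier inventory then some tier else pvAOuter inventory rest

def infer_tool_tier_py (inventory : List (String × Int)) : Option String :=
  pvAOuter inventory pvTiers

-- ===== PORT B =====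
-- inner 'for i, tier in enumerate(tiers): … break' of Source B
def pvBScan (item_lower : String) (best : Option (Nat × String)) : List String → Nat → Option (Nat × String)
  | [], _ => best
  | tier :: rest, i =>
      if PySem.Str.isIn tier item_lower then
        match best with
        | none => some (i, tier)
        | some b => if i < b.1 then some (i, tier) else some b
      else pvBScan item_lower best rest (i + 1)

def infer_tool_tier_py_alt (inventory : List (String × Int)) : Option String :=
  let best := inventory.foldl (fun best p =>
      let item_lower := PySem.Str.lower p.1
      if pvTools.any (fun tool => PySem.Str.isIn tool item_lower)
      then pvBScan item_lower best pvTiers 0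
      else best) none
  best.map (fun b => b.2)

-- ===== PRECONDITION & SPEC =====
def Spec_infer_tool_tier_py (inventory : List (String × Int)) (out : Option String) : Prop := out = infer_tool_tier_py_alt inventory
instance (inventory : List (String × Int)) (out : Option String) : Decidable (Spec_infer_tool_tier_py inventory out) := by unfold Spec_infer_tool_tier_py; infer_instance

-- ===== CLAIM (what is proved, stated in full; the proofs are below) =====
def Claim_equal_infer_tool_tier_py : Prop := ∀ (inventory : List (String × Int)), Dom_infer_tool_tier_py inventory → Spec_infer_tool_tier_py inventory (infer_tool_tier_py inventory)

-- ===== LEMMAS AND PROOFS =====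

-- the per-item condition for tier index k
def pvPred (tier : String) (x : String × Int) : Bool :=
  PySem.Str.isIn tier (PySem.Str.lower x.1)
    && pvTools.any (fun tool => PySem.Str.isIn tool (PySem.Str.lower x.1))

def pvChain (b0 b1 b2 b3 b4 : Bool) : Option (Nat × String) :=
  if b0 then some (0, "netherite") else if b1 then some (1, "diamond")
  else if b2 then some (2, "iron") else if b3 then some (3, "stone")
  else if b4 then some (4, "wooden") else none

def pvJoin (a b : Option (Nat × String)) : Option (Nat × String) :=
  match b with
  | none => a
  | some p => match a with
      | none => some p
      | some q => if p.1 < q.1 then some p else some q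

def pvSChain (inv : List (String × Int)) : Option (Nat × String) :=
  pvChain (inv.any (pvPred "netherite")) (inv.any (pvPred "diamond"))
    (inv.any (pvPred "iron")) (inv.any (pvPred "stone")) (inv.any (pvPred "wooden"))

theorem pvJoin_none_left (b : Option (Nat × String)) : pvJoin none b = b := by
  cases b <;> rfl

theorem pvAInner_eq_any (tier : String) (inv : List (String × Int)) :
    pvAInner tier inv = inv.any (pvPred tier) := by
  induction inv with
  | nil => rfl
  | cons x rest ih =>
      obtain ⟨item, n⟩ := x
      show (if pvPred tier (item, n) = true then true else pvAInner tier rest) = _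
      rw [List.any_cons, ih]
      cases hp : pvPred tier (item, n) <;> simp

theorem pvJoin_assoc (a b c : Option (Nat × String)) :
    pvJoin (pvJoin a b) c = pvJoin a (pvJoin b c) := by
  cases a <;> cases b <;> cases c <;>
    simp only [pvJoin] <;> split_ifs <;>
    simp only [pvJoin] <;> split_ifs <;> first | rfl | omega | (exfalso; omega)

theorem pvChain_or (p0 p1 p2 p3 p4 q0 q1 q2 q3 q4 : Bool) :
    pvChain (p0 || q0) (p1 || q1) (p2 || q2) (p3 || q3) (p4 || q4)
      = pvJoin (pvChain p0 p1 p2 p3 p4) (pvChain q0 q1 q2 q3 q4) := by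
  cases p0 <;> cases p1 <;> cases p2 <;> cases p3 <;> cases p4 <;>
    cases q0 <;> cases q1 <;> cases q2 <;> cases q3 <;> cases q4 <;> rfl

theorem pvBScan_eq (il : String) (best : Option (Nat × String)) :
    pvBScan il best pvTiers 0
      = pvJoin best (pvChain (PySem.Str.isIn "netherite" il) (PySem.Str.isIn "diamond" il)
          (PySem.Str.isIn "iron" il) (PySem.Str.isIn "stone" il) (PySem.Str.isIn "wooden" il)) := by
  simp only [pvTiers, pvBScan, pvChain]
  split_ifs <;> cases best <;> simp [pvJoin]

-- the contribution of a single item to B's accumulator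
def pvG (x : String × Int) : Option (Nat × String) :=
  if pvTools.any (fun tool => PySem.Str.isIn tool (PySem.Str.lower x.1)) then
    pvChain (PySem.Str.isIn "netherite" (PySem.Str.lower x.1))
      (PySem.Str.isIn "diamond" (PySem.Str.lower x.1))
      (PySem.Str.isIn "iron" (PySem.Str.lower x.1))
      (PySem.Str.isIn "stone" (PySem.Str.lower x.1))
      (PySem.Str.isIn "wooden" (PySem.Str.lower x.1))
  else none

theorem pvSChain_cons (x : String × Int) (r : List (String × Int)) :
    pvSChain (x :: r) = pvJoin (pvG x) (pvSChain r) := by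
  by_cases hT : (pvTools.any fun tool => PySem.Str.isIn tool (PySem.Str.lower x.1)) = true
  · rw [pvG, if_pos hT]
    simp only [pvSChain, List.any_cons, pvPred, hT, Bool.and_true, pvChain_or]
  · rw [pvG, if_neg hT, pvJoin_none_left]
    rw [Bool.not_eq_true] at hT
    simp only [pvSChain, List.any_cons, pvPred, hT, Bool.and_false, Bool.false_or]

theorem pvFoldl_eq (inv : List (String × Int)) (acc : Option (Nat × String)) :
    inv.foldl (fun best p =>
        if pvTools.any (fun tool => PySem.Str.isIn tool (PySem.Str.lower p.1))
        then pvBScan (PySem.Str.lower p.1) best pvTiers 0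
        else best) acc
      = pvJoin acc (pvSChain inv) := by
  induction inv generalizing acc with
  | nil => cases acc <;> rfl
  | cons x r ih =>
      simp only [List.foldl_cons, ih, pvSChain_cons, ← pvJoin_assoc]
      congr 1
      show (if (pvTools.any fun tool => PySem.Str.isIn tool (PySem.Str.lower x.1)) = true
            then pvBScan (PySem.Str.lower x.1) acc pvTiers 0 else acc) = pvJoin acc (pvG x)
      by_cases hT : (pvTools.any fun tool => PySem.Str.isIn tool (PySem.Str.lower x.1)) = true
      · rw [if_pos hT, pvBScan_eq, pvG, if_pos hT]
      · rw [if_neg hT, pvG, if_neg hT]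
        rfl

theorem pvMapSnd_chain (b0 b1 b2 b3 b4 : Bool) :
    (pvChain b0 b1 b2 b3 b4).map (fun b => b.2)
      = (if b0 then some "netherite" else if b1 then some "diamond" else if b2 then some "iron"
         else if b3 then some "stone" else if b4 then some "wooden" else none) := by
  cases b0 <;> cases b1 <;> cases b2 <;> cases b3 <;> cases b4 <;> rfl

-- ===== VERDICT (by name: the statement is the Claim_ definition above) =====
theorem infer_tool_tier_py_spec : Claim_equal_infer_tool_tier_py := by
  intro inv _
  unfold Spec_infer_tool_tier_py infer_tool_tier_py infer_tool_tier_py_alt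
  simp only [pvFoldl_eq, pvJoin_none_left]
  unfold pvSChain
  rw [pvMapSnd_chain]
  simp only [pvTiers, pvAOuter, pvAInner_eq_any]
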